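-- pv_equiv track=rewrite | github.com/SuperTaory/Abnormal-behavior-pattern-mining | MLES.py | EIIR
-- ===== SOURCE A (Python) =====
-- def JEP(S, m, v):
--     if (v + m) > len(S)-1:
--         if S[v] >= S[v - m]:
--             flag = 1
--         else:
--             flag = -1
--     elif v - m < 0:
--         if S[v] >= S[v + m]:
--             flag = 1
--         else:
--             flag = -1
--     elif v - m >= 0 and v + m <= len(S) - 1:
--         if S[v] >= S[v + m] and S[v] >= S[v - m]:
--             flag = 1
--         elif S[v] <= S[v + m] and S[v] <= S[v - m]:
--             flag = -1
--         else:
--             flag = 0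
--     else:
--         flag = 0
--     return flag
--
-- def EIIR(S):
--     tag = [0] * len(S)
--     # 设置遍历邻域范围cyc
--     cyc = 10
--     # tag[0] = tag[len(S)-1] = cyc + 1
--     for i in range(1, cyc + 1):
--         for j in range(0, len(S)):
--             if tag[j] == i - 1 and JEP(S, i, j) == 1:
--                 tag[j] += 1
--             elif tag[j] == -(i - 1) and JEP(S, i, j) == -1:
--                 tag[j] -= 1
--             else:
--                 pass
--     return tag
-- ===== SOURCE B (Python) =====
-- def JEP(S, m, v):
--     if (v + m) > len(S)-1:
--         if S[v] >= S[v - m]: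
--             flag = 1
--         else:
--             flag = -1
--     elif v - m < 0:
--         if S[v] >= S[v + m]:
--             flag = 1
--         else:
--             flag = -1
--     elif v - m >= 0 and v + m <= len(S) - 1:
--         if S[v] >= S[v + m] and S[v] >= S[v - m]:
--             flag = 1
--         elif S[v] <= S[v + m] and S[v] <= S[v - m]:
--             flag = -1
--         else:
--             flag = 0
--     else:
--         flag = 0
--     return flag
--
-- def EIIR(S):
--     # per-element run-length scan instead of level-synchronous multi-pass expansion
--     n = len(S)
--     tag = [0] * n
--     for j in range(n):
--         t = 0
--         for i in range(1, 11):
--             if JEP(S, i, j) == 1: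
--                 t += 1
--             else:
--                 break
--         if t == 0:
--             for i in range(1, 11):
--                 if JEP(S, i, j) == -1:
--                     t -= 1
--                 else:
--                     break
--         tag[j] = t
--     return tag
-- ===== Notes on version B (the rewrite author's own statement) =====
-- stated objective: alternative
-- what changed: Replaces the level-synchronous 10-pass expansion (for each level i, sweep all j and grow surviving tags by one) with a single pass over j computing each tag as a run length of consecutive JEP==1 (else JEP==-1) values with early break, capped at 10.
import Mathlib
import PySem

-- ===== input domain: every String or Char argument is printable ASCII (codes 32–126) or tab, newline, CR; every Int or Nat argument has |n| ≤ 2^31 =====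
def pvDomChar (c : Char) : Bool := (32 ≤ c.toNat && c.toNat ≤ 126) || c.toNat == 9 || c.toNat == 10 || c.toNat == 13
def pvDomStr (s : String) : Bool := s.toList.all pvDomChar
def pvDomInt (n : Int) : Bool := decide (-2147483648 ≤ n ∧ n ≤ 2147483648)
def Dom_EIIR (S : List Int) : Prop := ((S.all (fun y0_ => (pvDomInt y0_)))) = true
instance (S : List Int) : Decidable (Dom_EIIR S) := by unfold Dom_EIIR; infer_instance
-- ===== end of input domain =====

-- B replaces A's level-synchronous 10-pass tag expansion by a per-element run-length
-- scan with early break (alternative decomposition; return-value equivalence on Pre_).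

-- ===== PORT A =====
-- JEP, shared helper of both versions; 'none' = Python IndexError (negative index
-- beyond -len(S) in the first branch).
def JEP (S : List Int) (m v : Int) : Option Int :=
  if v + m > (S.length : Int) - 1 then
    match PySem.List.pyGet? S v, PySem.List.pyGet? S (v - m) with
    | some a, some b => some (if b ≤ a then 1 else -1)
    | _, _ => none
  else if v - m < 0 then
    match PySem.List.pyGet? S v, PySem.List.pyGet? S (v + m) with
    | some a, some b => some (if b ≤ a then 1 else -1)
    | _, _ => none
  else if 0 ≤ v - m ∧ v + m ≤ (S.length : Int) - 1 then
    match PySem.List.pyGet? S v, PySem.List.pyGet? S (v + m), PySem.List.pyGet? S (v - m) with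
    | some a, some b, some c => some (if b ≤ a ∧ c ≤ a then 1 else if a ≤ b ∧ a ≤ c then -1 else 0)
    | _, _, _ => none
  else some 0

-- the body of A's j-loop: new value of tag[j] from its old value t (none = IndexError)
def bodyA (S : List Int) (i t j : Int) : Option Int :=
  if t = i - 1 then
    match JEP S i j with
    | none => none
    | some f =>
      if f = 1 then some (t + 1)
      else if t = -(i - 1) then
        match JEP S i j with
        | none => none
        | some g => if g = -1 then some (t - 1) else some t
      else some t
  else if t = -(i - 1) then
    match JEP S i j with
    | none => none
    | some g => if g = -1 then some (t - 1) else some t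
  else some t

-- A's inner loop 'for j in range(0, len(S))' (each step reads and writes only tag[j])
def innerA (S : List Int) (i : Int) : Int → List Int → Option (List Int)
  | _, [] => some []
  | j, t :: rest =>
    match bodyA S i t j with
    | none => none
    | some t' =>
      match innerA S i (j + 1) rest with
      | none => none
      | some rest' => some (t' :: rest')

-- A's outer loop 'for i in range(1, cyc + 1)', fuel f ↦ level i = 10 - (f - 1)
def outerA (S : List Int) : Nat → List Int → Option (List Int)
  | 0, tag => some tag
  | f + 1, tag =>
    match innerA S (10 - (f : Int)) 0 tag with
    | none => none
    | some tag' => outerA S f tag'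

def EIIR (S : List Int) : List Int :=
  (outerA S 10 (List.replicate S.length 0)).getD []  -- none = IndexError, excluded by Pre_

-- ===== PORT B =====
-- 'for i in range(1, 11): if JEP(S,i,j)==1: t+=1 else: break', fuel f ↦ i = 10 - (f-1)
def scanP (S : List Int) (j : Int) : Nat → Int → Int
  | 0, t => t
  | f + 1, t => if JEP S (10 - (f : Int)) j = some 1 then scanP S j f (t + 1) else t

def scanN (S : List Int) (j : Int) : Nat → Int → Int
  | 0, t => t
  | f + 1, t => if JEP S (10 - (f : Int)) j = some (-1) then scanN S j f (t - 1) else t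

-- per-element body of B's single j-loop
def bVal (S : List Int) (j : Int) : Int :=
  let t := scanP S j 10 0
  if t = 0 then scanN S j 10 0 else t

def EIIR_alt (S : List Int) : List Int :=
  (List.range S.length).map (fun j : Nat => bVal S (j : Int))

-- ===== PRECONDITION & SPEC =====
-- Pre_ excludes exactly the inputs on which A raises IndexError: a position j with
-- len(S)+j < 10 whose JEP values stay constantly 1 (or constantly -1) up to depth
-- len(S)+j, which drives tag[j] to a negative index below -len(S).
def Pre_EIIR (S : List Int) : Prop :=
  ∀ j ∈ List.range S.length, (j : Int) + S.length < 10 →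
    ¬ ((∀ m ∈ List.range (S.length + j), (JEP S ((m : Int) + 1) (j : Int)).getD 0 = 1) ∨
       (∀ m ∈ List.range (S.length + j), (JEP S ((m : Int) + 1) (j : Int)).getD 0 = -1))
instance (S : List Int) : Decidable (Pre_EIIR S) := by unfold Pre_EIIR; infer_instance

def pvWitness_EIIR : List Int := [0, 1, 2, 3, 4, 5, 6, 7, 8, 9]

def Spec_EIIR (S : List Int) (out : List Int) : Prop := out = EIIR_alt S
instance (S : List Int) (out : List Int) : Decidable (Spec_EIIR S out) := by unfold Spec_EIIR; infer_instance

-- ===== CLAIM (what is proved, stated in full; the proofs are below) =====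
def Claim_equal_EIIR : Prop := ∀ (S : List Int), Dom_EIIR S → Pre_EIIR S → Spec_EIIR S (EIIR S)

-- ===== LEMMAS AND PROOFS =====

def clip (i v : Int) : Int := if v < -i then -i else if i < v then i else v

lemma scanP_spec (S : List Int) (j : Int) :
    ∀ (f : Nat) (t : Int), ∃ k : Nat, k ≤ f ∧ scanP S j f t = t + k ∧
      (∀ m : Nat, m < k → JEP S (11 - (f : Int) + m) j = some 1) ∧
      (k < f → JEP S (11 - (f : Int) + k) j ≠ some 1) := by
  intro f
  induction f with
  | zero => intro t; exact ⟨0, le_refl _, by simp [scanP], by omega, by omega⟩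
  | succ f ih =>
    intro t
    by_cases h : JEP S (10 - (f : Int)) j = some 1
    · obtain ⟨k', hk'le, hval, hchain, hbrk⟩ := ih (t + 1)
      refine ⟨k' + 1, by omega, ?_, ?_, ?_⟩
      · rw [scanP, if_pos h, hval]; push_cast; ring
      · intro m hm
        cases m with
        | zero => have e : (11 : Int) - ((f + 1 : Nat) : Int) + ((0 : Nat) : Int) = 10 - f := by push_cast; ring
                  rw [e]; exact h
        | succ m' =>
          have e : (11 : Int) - ((f + 1 : Nat) : Int) + ((m' + 1 : Nat) : Int) = 11 - f + m' := by push_cast; ring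
          rw [e]; exact hchain m' (by omega)
      · intro hlt
        have e : (11 : Int) - ((f + 1 : Nat) : Int) + ((k' + 1 : Nat) : Int) = 11 - f + k' := by push_cast; ring
        rw [e]; exact hbrk (by omega)
    · refine ⟨0, by omega, by rw [scanP, if_neg h]; simp, by omega, ?_⟩
      intro _
      have e : (11 : Int) - ((f + 1 : Nat) : Int) + ((0 : Nat) : Int) = 10 - f := by push_cast; ring
      rw [e]; exact h

lemma scanN_spec (S : List Int) (j : Int) :
    ∀ (f : Nat) (t : Int), ∃ k : Nat, k ≤ f ∧ scanN S j f t = t - k ∧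
      (∀ m : Nat, m < k → JEP S (11 - (f : Int) + m) j = some (-1)) ∧
      (k < f → JEP S (11 - (f : Int) + k) j ≠ some (-1)) := by
  intro f
  induction f with
  | zero => intro t; exact ⟨0, le_refl _, by simp [scanN], by omega, by omega⟩
  | succ f ih =>
    intro t
    by_cases h : JEP S (10 - (f : Int)) j = some (-1)
    · obtain ⟨k', hk'le, hval, hchain, hbrk⟩ := ih (t - 1)
      refine ⟨k' + 1, by omega, ?_, ?_, ?_⟩
      · rw [scanN, if_pos h, hval]; push_cast; ring
      · intro m hm
        cases m with
        | zero => have e : (11 : Int) - ((f + 1 : Nat) : Int) + ((0 : Nat) : Int) = 10 - f := by push_cast; ring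
                  rw [e]; exact h
        | succ m' =>
          have e : (11 : Int) - ((f + 1 : Nat) : Int) + ((m' + 1 : Nat) : Int) = 11 - f + m' := by push_cast; ring
          rw [e]; exact hchain m' (by omega)
      · intro hlt
        have e : (11 : Int) - ((f + 1 : Nat) : Int) + ((k' + 1 : Nat) : Int) = 11 - f + k' := by push_cast; ring
        rw [e]; exact hbrk (by omega)
    · refine ⟨0, by omega, by rw [scanN, if_neg h]; simp, by omega, ?_⟩
      intro _
      have e : (11 : Int) - ((f + 1 : Nat) : Int) + ((0 : Nat) : Int) = 10 - f := by push_cast; ring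
      rw [e]; exact h

lemma pyGet?_some_of (S : List Int) (i : Int) (h1 : -(S.length : Int) ≤ i)
    (h2 : i < (S.length : Int)) : ∃ a, PySem.List.pyGet? S i = some a := by
  cases h : PySem.List.pyGet? S i with
  | some a => exact ⟨a, rfl⟩
  | none =>
    rw [PySem.List.pyGet?_eq_none_iff] at h
    exact absurd (by simp [PySem.Raise.InRange]; omega) h

lemma JEP_ne_none (S : List Int) (i j : Int) (hj0 : 0 ≤ j) (hjn : j < (S.length : Int))
    (hi : 1 ≤ i) (hle : i ≤ (S.length : Int) + j) : JEP S i j ≠ none := by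
  obtain ⟨a, ha⟩ := pyGet?_some_of S j (by omega) hjn
  unfold JEP
  split_ifs with h1 h2 h3
  · obtain ⟨b, hb⟩ := pyGet?_some_of S (j - i) (by omega) (by omega)
    rw [ha, hb]; simp
  · obtain ⟨b, hb⟩ := pyGet?_some_of S (j + i) (by omega) (by omega)
    rw [ha, hb]; simp
  · obtain ⟨b, hb⟩ := pyGet?_some_of S (j + i) (by omega) (by omega)
    obtain ⟨c, hc⟩ := pyGet?_some_of S (j - i) (by omega) (by omega)
    rw [ha, hb, hc]; simp
  · simp

lemma pre_no_chainP (S : List Int) (hpre : Pre_EIIR S) (j : Nat) (hj : j < S.length)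
    (d : Nat) (hd10 : d < 10)
    (hchain : ∀ m : Nat, m < d → JEP S (1 + (m : Int)) (j : Int) = some 1)
    (hnone : JEP S (1 + (d : Int)) (j : Int) = none) : False := by
  have hjn : (j : Int) < (S.length : Int) := by exact_mod_cast hj
  have hlt : (S.length : Int) + j < 1 + d := by
    by_contra hc
    exact JEP_ne_none S (1 + d) j (by omega) hjn (by omega) (by omega) hnone
  refine hpre j (List.mem_range.mpr hj) (by omega) (Or.inl ?_)
  intro m hm
  rw [List.mem_range] at hm
  have e : ((m : Int) + 1) = 1 + m := by ring
  rw [e, hchain m (by omega)]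
  rfl

lemma pre_no_chainN (S : List Int) (hpre : Pre_EIIR S) (j : Nat) (hj : j < S.length)
    (d : Nat) (hd10 : d < 10)
    (hchain : ∀ m : Nat, m < d → JEP S (1 + (m : Int)) (j : Int) = some (-1))
    (hnone : JEP S (1 + (d : Int)) (j : Int) = none) : False := by
  have hjn : (j : Int) < (S.length : Int) := by exact_mod_cast hj
  have hlt : (S.length : Int) + j < 1 + d := by
    by_contra hc
    exact JEP_ne_none S (1 + d) j (by omega) hjn (by omega) (by omega) hnone
  refine hpre j (List.mem_range.mpr hj) (by omega) (Or.inr ?_)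
  intro m hm
  rw [List.mem_range] at hm
  have e : ((m : Int) + 1) = 1 + m := by ring
  rw [e, hchain m (by omega)]
  rfl

lemma bodyA_clip (S : List Int) (hpre : Pre_EIIR S) (j : Nat) (hj : j < S.length)
    (i : Int) (hi1 : 1 ≤ i) (hi2 : i ≤ 10) :
    bodyA S i (clip (i - 1) (bVal S j)) (j : Int) = some (clip i (bVal S j)) := by
  have hjn : (j : Int) < (S.length : Int) := by exact_mod_cast hj
  obtain ⟨k, hk10, hkval, hkchain, hkbrk⟩ := scanP_spec S (j : Int) 10 0
  obtain ⟨l, hl10, hlval, hlchain, hlbrk⟩ := scanN_spec S (j : Int) 10 0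
  have chP : ∀ m : Nat, m < k → JEP S (1 + (m : Int)) (j : Int) = some 1 := by
    intro m hm
    have e : (11 : Int) - ((10 : Nat) : Int) + m = 1 + m := by norm_num
    rw [← e]; exact hkchain m hm
  have brP : k < 10 → JEP S (1 + (k : Int)) (j : Int) ≠ some 1 := by
    intro h
    have e : (11 : Int) - ((10 : Nat) : Int) + k = 1 + k := by norm_num
    rw [← e]; exact hkbrk h
  have chN : ∀ m : Nat, m < l → JEP S (1 + (m : Int)) (j : Int) = some (-1) := by
    intro m hm
    have e : (11 : Int) - ((10 : Nat) : Int) + m = 1 + m := by norm_num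
    rw [← e]; exact hlchain m hm
  have brN : l < 10 → JEP S (1 + (l : Int)) (j : Int) ≠ some (-1) := by
    intro h
    have e : (11 : Int) - ((10 : Nat) : Int) + l = 1 + l := by norm_num
    rw [← e]; exact hlbrk h
  have hscanP : scanP S (j : Int) 10 0 = (k : Int) := by rw [hkval]; ring
  have hscanN : scanN S (j : Int) 10 0 = -(l : Int) := by rw [hlval]; ring
  by_cases hk0 : k = 0
  · -- bVal = -l
    have hv : bVal S (j : Int) = -(l : Int) := by
      simp only [bVal, hscanP, hscanN, hk0]; norm_num
    have jep1 : JEP S 1 (j : Int) ≠ some 1 := by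
      have := brP (by omega)
      simpa [hk0] using this
    by_cases hi1' : i = 1
    · subst hi1'
      have ht : clip (1 - 1) (bVal S (j : Int)) = 0 := by
        rw [hv]; unfold clip; split_ifs <;> omega
      rw [ht]
      have hne : JEP S 1 (j : Int) ≠ none :=
        JEP_ne_none S 1 (j : Int) (by omega) hjn (by omega) (by omega)
      cases hJ : JEP S 1 (j : Int) with
      | none => exact absurd hJ hne
      | some f =>
        have hf1 : f ≠ 1 := by rintro rfl; exact jep1 hJ
        by_cases hl0 : l = 0
        · have hfne : f ≠ -1 := by
            rintro rfl; exact brN (by omega) (by simpa [hl0] using hJ)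
          have hcl : clip 1 (bVal S (j : Int)) = 0 := by
            rw [hv, hl0]; unfold clip; norm_num
          rw [hcl]
          simp [bodyA, hJ, hf1, hfne]
        · have hJm : JEP S 1 (j : Int) = some (-1) := by
            have := chN 0 (by omega); simpa using this
          have hf : f = -1 := by rw [hJ] at hJm; exact (Option.some_inj.mp hJm)
          have hcl : clip 1 (bVal S (j : Int)) = -1 := by
            rw [hv]; unfold clip; split_ifs <;> omega
          rw [hcl]
          simp [bodyA, hJ, hf, hf1]
    · -- i ≥ 2
      have hi2' : 2 ≤ i := by omega
      by_cases hil : i ≤ (l : Int)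
      · have ht : clip (i - 1) (bVal S (j : Int)) = -(i - 1) := by
          rw [hv]; unfold clip; split_ifs <;> omega
        have hcl : clip i (bVal S (j : Int)) = -i := by
          rw [hv]; unfold clip; split_ifs <;> omega
        rw [ht, hcl]
        have hJ : JEP S i (j : Int) = some (-1) := by
          have := chN (i - 1).toNat (by omega)
          have e : (1 : Int) + ((i - 1).toNat : Int) = i := by omega
          rwa [e] at this
        have c1 : ¬(-(i - 1) = i - 1) := by omega
        simp [bodyA, hJ, c1]
      · by_cases hil1 : i = (l : Int) + 1
        · have ht : clip (i - 1) (bVal S (j : Int)) = -(l : Int) := by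
            rw [hv]; unfold clip; split_ifs <;> omega
          have hcl : clip i (bVal S (j : Int)) = -(l : Int) := by
            rw [hv]; unfold clip; split_ifs <;> omega
          rw [ht, hcl]
          have hne : JEP S i (j : Int) ≠ none := by
            intro hn
            refine pre_no_chainN S hpre j hj l (by omega) chN ?_
            have e : (1 : Int) + (l : Int) = i := by omega
            rwa [e]
          cases hJ : JEP S i (j : Int) with
          | none => exact absurd hJ hne
          | some f =>
            have hf : f ≠ -1 := by
              rintro rfl
              refine brN (by omega) ?_
              have e : (1 : Int) + (l : Int) = i := by omega
              rwa [e]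
            have c1 : ¬(-(l : Int) = i - 1) := by omega
            have c2 : -(l : Int) = -(i - 1) := by omega
            simp [bodyA, hJ, c1, c2, hf] <;> (intros; omega)
        · have ht : clip (i - 1) (bVal S (j : Int)) = -(l : Int) := by
            rw [hv]; unfold clip; split_ifs <;> omega
          have hcl : clip i (bVal S (j : Int)) = -(l : Int) := by
            rw [hv]; unfold clip; split_ifs <;> omega
          rw [ht, hcl]
          have c1 : ¬(-(l : Int) = i - 1) := by omega
          have c2 : ¬(-(l : Int) = -(i - 1)) := by omega
          simp [bodyA, c1, c2] <;> (intros; omega)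
  · -- bVal = k ≥ 1
    have hv : bVal S (j : Int) = (k : Int) := by
      simp only [bVal, hscanP, hscanN]
      rw [if_neg (by exact_mod_cast hk0)]
    by_cases hik : i ≤ (k : Int)
    · have ht : clip (i - 1) (bVal S (j : Int)) = i - 1 := by
        rw [hv]; unfold clip; split_ifs <;> omega
      have hcl : clip i (bVal S (j : Int)) = i := by
        rw [hv]; unfold clip; split_ifs <;> omega
      rw [ht, hcl]
      have hJ : JEP S i (j : Int) = some 1 := by
        have := chP (i - 1).toNat (by omega)
        have e : (1 : Int) + ((i - 1).toNat : Int) = i := by omega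
        rwa [e] at this
      have : i - 1 + 1 = i := by ring
      simp [bodyA, hJ, this]
    · by_cases hik1 : i = (k : Int) + 1
      · have ht : clip (i - 1) (bVal S (j : Int)) = (k : Int) := by
          rw [hv]; unfold clip; split_ifs <;> omega
        have hcl : clip i (bVal S (j : Int)) = (k : Int) := by
          rw [hv]; unfold clip; split_ifs <;> omega
        rw [ht, hcl]
        have hne : JEP S i (j : Int) ≠ none := by
          intro hn
          refine pre_no_chainP S hpre j hj k (by omega) chP ?_
          have e : (1 : Int) + (k : Int) = i := by omega
          rwa [e]
        cases hJ : JEP S i (j : Int) with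
        | none => exact absurd hJ hne
        | some f =>
          have hf : f ≠ 1 := by
            rintro rfl
            refine brP (by omega) ?_
            have e : (1 : Int) + (k : Int) = i := by omega
            rwa [e]
          have c1 : (k : Int) = i - 1 := by omega
          have c2 : ¬((k : Int) = -(i - 1)) := by omega
          simp [bodyA, hJ, c1, c2, hf] <;> (intros; omega)
      · have ht : clip (i - 1) (bVal S (j : Int)) = (k : Int) := by
          rw [hv]; unfold clip; split_ifs <;> omega
        have hcl : clip i (bVal S (j : Int)) = (k : Int) := by
          rw [hv]; unfold clip; split_ifs <;> omega
        rw [ht, hcl]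
        have c1 : ¬((k : Int) = i - 1) := by omega
        have c2 : ¬((k : Int) = -(i - 1)) := by omega
        simp [bodyA, c1, c2] <;> (intros; omega)

lemma innerA_spec (S : List Int) (i : Int) (f f' : Nat → Int) :
    ∀ (m a : Nat),
      (∀ r : Nat, r < m → bodyA S i (f (a + r)) ((a + r : Nat) : Int) = some (f' (a + r))) →
      innerA S i (a : Int) ((List.range' a m).map f) = some ((List.range' a m).map f') := by
  intro m
  induction m with
  | zero => intro a _; simp [innerA]
  | succ m ih =>
    intro a h
    have hhead : bodyA S i (f a) (a : Int) = some (f' a) := by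
      have := h 0 (by omega); simpa using this
    have htail : innerA S i ((a + 1 : Nat) : Int) ((List.range' (a + 1) m).map f) =
        some ((List.range' (a + 1) m).map f') := by
      refine ih (a + 1) ?_
      intro r hr
      have := h (r + 1) (by omega)
      have e : a + (r + 1) = a + 1 + r := by omega
      rwa [e] at this
    have ecast : ((a : Int) + 1) = ((a + 1 : Nat) : Int) := by push_cast; ring
    rw [List.range'_succ]
    simp only [List.map_cons, innerA, hhead, ecast, htail]

lemma bVal_bound (S : List Int) (j : Int) : -10 ≤ bVal S j ∧ bVal S j ≤ 10 := by
  obtain ⟨k, hk10, hkval, -, -⟩ := scanP_spec S j 10 0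
  obtain ⟨l, hl10, hlval, -, -⟩ := scanN_spec S j 10 0
  simp only [bVal, hkval, hlval]
  split_ifs <;> omega

lemma outerA_spec (S : List Int) (hpre : Pre_EIIR S) :
    ∀ f : Nat, f ≤ 10 →
      outerA S f ((List.range' 0 S.length).map (fun j : Nat => clip (10 - (f : Int)) (bVal S (j : Int)))) =
        some ((List.range' 0 S.length).map (fun j : Nat => clip 10 (bVal S (j : Int)))) := by
  intro f
  induction f with
  | zero => intro _; norm_num [outerA]
  | succ f ih =>
    intro hf
    have hinner := innerA_spec S (10 - (f : Int))
      (fun j : Nat => clip (10 - ((f + 1 : Nat) : Int)) (bVal S (j : Int)))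
      (fun j : Nat => clip (10 - (f : Int)) (bVal S (j : Int))) S.length 0 ?_
    · rw [outerA]
      have e0 : ((0 : Nat) : Int) = 0 := rfl
      rw [← e0, hinner]
      exact ih (by omega)
    · intro r hr
      have e : (10 : Int) - ((f + 1 : Nat) : Int) = (10 - (f : Int)) - 1 := by push_cast; ring
      simp only [e]
      exact bodyA_clip S hpre (0 + r) (by omega) (10 - (f : Int)) (by omega) (by omega)

-- ===== VERDICT (by name: the statement is the Claim_ definition above) =====
theorem EIIR_spec : Claim_equal_EIIR := by
  intro S _ hpre
  unfold Spec_EIIR EIIR EIIR_alt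
  have hinit : List.replicate S.length (0 : Int) =
      (List.range' 0 S.length).map (fun j : Nat => clip (10 - ((10 : Nat) : Int)) (bVal S (j : Int))) := by
    have : ∀ j : Nat, clip (10 - ((10 : Nat) : Int)) (bVal S j) = 0 := by
      intro j; unfold clip; split_ifs <;> omega
    calc List.replicate S.length (0 : Int)
        = (List.range' 0 S.length).map (fun _ => (0 : Int)) := by
          rw [List.map_const']; simp [List.length_range']
      _ = _ := by
          apply List.map_congr_left; intro a _; rw [this a]
  rw [hinit, outerA_spec S hpre 10 (by omega), Option.getD_some]
  rw [List.range_eq_range']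
  apply List.map_congr_left
  intro a _
  have := bVal_bound S (a : Int)
  unfold clip
  split_ifs <;> omega
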